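-- pv_equiv track=rewrite | github.com/biosafetylvl5/merge-word-comments | src/merge_word_comments/merge.py | _find_closest_occurrence
-- ===== SOURCE A (Python) =====
-- def _find_closest_occurrence(
--     text: str, target: str, hint_offset: int,
-- ) -> int:
--     """Find the occurrence of *target* in *text* closest to *hint_offset*.
--
--     Returns the found offset, or -1 if *target* is not in *text*.
--     """
--     best_pos = -1
--     best_dist = float("inf")
--     start = 0
--     while True:
--         pos = text.find(target, start)
--         if pos == -1:
--             break
--         dist = abs(pos - hint_offset)
--         if dist < best_dist:
--             best_dist = dist
--             best_pos = pos
--         start = pos + 1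
--     return best_pos
-- ===== SOURCE B (Python) =====
-- def _find_closest_occurrence(
--     text: str, target: str, hint_offset: int,
-- ) -> int:
--     """Two boundary probes instead of scanning every occurrence: the first
--     occurrence at/after the hint and the last one strictly before it."""
--     after = text.find(target, max(hint_offset, 0))
--     if hint_offset <= 0:
--         return after
--     before = text.rfind(target, 0, hint_offset + len(target) - 1)
--     if before == -1:
--         return after
--     if after == -1:
--         return before
--     return before if hint_offset - before <= after - hint_offset else after
-- ===== Notes on version B (the rewrite author's own statement) =====
-- stated objective: alternative
-- what changed: Replaces A's while-loop over every occurrence of target (repeated text.find with a moving start, keeping the running best) by two boundary probes - text.find(target, max(hint,0)) for the nearest occurrence at/after the hint and text.rfind(target, 0, hint+len(target)-1) for the nearest one before it - and a single distance comparison with earliest-wins tie-break.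
import Mathlib
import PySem

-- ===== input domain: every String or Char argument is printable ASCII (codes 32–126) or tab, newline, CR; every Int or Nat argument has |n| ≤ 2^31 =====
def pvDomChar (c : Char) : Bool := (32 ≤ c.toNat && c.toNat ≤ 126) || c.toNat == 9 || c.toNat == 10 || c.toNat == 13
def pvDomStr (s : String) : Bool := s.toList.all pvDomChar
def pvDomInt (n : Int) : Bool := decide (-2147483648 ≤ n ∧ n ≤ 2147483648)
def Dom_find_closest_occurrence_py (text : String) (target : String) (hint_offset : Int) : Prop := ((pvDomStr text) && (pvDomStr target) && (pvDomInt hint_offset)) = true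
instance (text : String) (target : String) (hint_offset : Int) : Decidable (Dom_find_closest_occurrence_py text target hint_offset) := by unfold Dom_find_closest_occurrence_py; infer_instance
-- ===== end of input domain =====

-- B replaces A's scan over every occurrence by two boundary probes (find at/after the hint,
-- rfind at/before it) and one distance comparison; same return value on every input.

-- ===== PORT A =====
-- A's `while True` loop: state (start, best_pos, best_dist); `best_dist = float("inf")` is
-- `none : Option Int`.  The locals `pos`/`dist` are inlined.  The loop runs on fuel
-- `len(text) + 2`, which is never exhausted because `start` strictly increases and
-- `text.find(target, start)` is -1 once `start` passes the end.
def pyALoop (s L : List Char) (h : Int) : Nat → Nat → Int → Option Int → Int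
  | 0, _, best_pos, _ => best_pos
  | fuel+1, start, best_pos, best_dist =>
    if PySem.Chars.findFrom s L (start : Int) none = -1 then best_pos
    else
      match best_dist with
      | none =>
          pyALoop s L h fuel ((PySem.Chars.findFrom s L (start : Int) none).toNat + 1)
            (PySem.Chars.findFrom s L (start : Int) none)
            (some |PySem.Chars.findFrom s L (start : Int) none - h|)
      | some d =>
          if |PySem.Chars.findFrom s L (start : Int) none - h| < d then
            pyALoop s L h fuel ((PySem.Chars.findFrom s L (start : Int) none).toNat + 1)
              (PySem.Chars.findFrom s L (start : Int) none)
              (some |PySem.Chars.findFrom s L (start : Int) none - h|)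
          else
            pyALoop s L h fuel ((PySem.Chars.findFrom s L (start : Int) none).toNat + 1)
              best_pos best_dist

def find_closest_occurrence_py (text : String) (target : String) (hint_offset : Int) : Int :=
  pyALoop text.toList target.toList hint_offset (text.toList.length + 2) 0 (-1) none

-- ===== PORT B =====
-- Source B's locals `after` / `before` as helpers (each is one Python find/rfind call).
def pyAfter (text : String) (target : String) (hint_offset : Int) : Int :=
  PySem.Str.findFrom text target (max hint_offset 0) none

def pyBefore (text : String) (target : String) (hint_offset : Int) : Int :=
  PySem.Str.rfindFrom text target 0 (some (hint_offset + PySem.Str.len target - 1))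

def find_closest_occurrence_py_alt (text : String) (target : String) (hint_offset : Int) : Int :=
  if hint_offset ≤ 0 then pyAfter text target hint_offset
  else if pyBefore text target hint_offset = -1 then pyAfter text target hint_offset
  else if pyAfter text target hint_offset = -1 then pyBefore text target hint_offset
  else if hint_offset - pyBefore text target hint_offset ≤ pyAfter text target hint_offset - hint_offset
  then pyBefore text target hint_offset
  else pyAfter text target hint_offset

-- ===== PRECONDITION & SPEC =====
def Spec_find_closest_occurrence_py (text : String) (target : String) (hint_offset : Int) (out : Int) : Prop := out = find_closest_occurrence_py_alt text target hint_offset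
instance (text : String) (target : String) (hint_offset : Int) (out : Int) : Decidable (Spec_find_closest_occurrence_py text target hint_offset out) := by unfold Spec_find_closest_occurrence_py; infer_instance

-- ===== CLAIM (what is proved, stated in full; the proofs are below) =====
def Claim_equal_find_closest_occurrence_py : Prop := ∀ (text : String) (target : String) (hint_offset : Int), Dom_find_closest_occurrence_py text target hint_offset → Spec_find_closest_occurrence_py text target hint_offset (find_closest_occurrence_py text target hint_offset)

-- ===== LEMMAS AND PROOFS =====

-- `j` is an occurrence of `L` in `s`
def IsOcc (s L : List Char) (j : Nat) : Prop := j ≤ s.length ∧ L <+: s.drop j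

-- the (unique) value A and B must return: -1 when there is no occurrence, otherwise the
-- occurrence minimising |j - h|, earliest on ties
def GoodOut (s L : List Char) (h r : Int) : Prop :=
  (r = -1 ∧ ∀ j : Nat, ¬ IsOcc s L j) ∨
  (∃ jr : Nat, r = (jr : Int) ∧ IsOcc s L jr ∧
     ∀ j : Nat, IsOcc s L j →
       |r - h| < |(j : Int) - h| ∨ (|r - h| = |(j : Int) - h| ∧ r ≤ (j : Int)))

lemma goodOut_unique {s L : List Char} {h r1 r2 : Int}
    (h1 : GoodOut s L h r1) (h2 : GoodOut s L h r2) : r1 = r2 := by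
  rcases h1 with ⟨he1, hn1⟩ | ⟨j1, hv1, ho1, hm1⟩
  · rcases h2 with ⟨he2, _⟩ | ⟨j2, _, ho2, _⟩
    · rw [he1, he2]
    · exact absurd ho2 (hn1 j2)
  · rcases h2 with ⟨_, hn2⟩ | ⟨j2, hv2, ho2, hm2⟩
    · exact absurd ho1 (hn2 j1)
    · have h12 := hm1 j2 ho2
      have h21 := hm2 j1 ho1
      rw [hv1] at h12 ⊢
      rw [hv2] at h21 ⊢
      rcases h12 with ha | ⟨ha, hb⟩ <;> rcases h21 with hc | ⟨hc, hd⟩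
      · exact absurd (ha.trans hc) (lt_irrefl _)
      · rw [hc] at ha; exact absurd ha (lt_irrefl _)
      · rw [ha] at hc; exact absurd hc (lt_irrefl _)
      · omega

lemma isOcc_infix_drop {s L : List Char} {k j : Nat} (hkj : k ≤ j) (hj : IsOcc s L j) :
    L <:+: s.drop k := by
  obtain ⟨_, hp⟩ := hj
  have hd : (s.drop k).drop (j - k) = s.drop j := by
    rw [List.drop_drop]; congr 1; omega
  have hp' : L <+: (s.drop k).drop (j - k) := by rw [hd]; exact hp
  exact hp'.isInfix.trans (List.drop_suffix _ _).isInfix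

lemma infix_drop_exists {s L : List Char} {k : Nat} (hk : k ≤ s.length)
    (h : L <:+: s.drop k) : ∃ j, k ≤ j ∧ IsOcc s L j := by
  obtain ⟨t, u, htu⟩ := h
  have hlen := congrArg List.length htu
  simp only [List.length_append, List.length_drop] at hlen
  refine ⟨k + t.length, by omega, ⟨by omega, ?_⟩⟩
  have hd : s.drop (k + t.length) = (s.drop k).drop t.length := by
    rw [List.drop_drop]
  rw [hd, ← htu, List.append_assoc, List.drop_left]
  exact List.prefix_append L u

lemma findFrom_none_iff {s L : List Char} {k : Nat} (hk : k ≤ s.length) :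
    PySem.Chars.findFrom s L (k : Int) none = -1 ↔ ∀ j, k ≤ j → ¬ IsOcc s L j := by
  rw [PySem.Chars.findFrom_natCast_eq_neg_one_iff s L k hk]
  constructor
  · intro hni j hkj hocc; exact hni (isOcc_infix_drop hkj hocc)
  · intro hno hinf
    obtain ⟨j, hkj, hocc⟩ := infix_drop_exists hk hinf
    exact hno j hkj hocc

lemma findFrom_pos_spec' {s L : List Char} {k : Nat} (hk : k ≤ s.length)
    (h : PySem.Chars.findFrom s L (k : Int) none ≠ -1) :
    ∃ p : Nat, PySem.Chars.findFrom s L (k : Int) none = (p : Int) ∧ k ≤ p ∧ IsOcc s L p ∧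
      ∀ i, k ≤ i → i < p → ¬ L <+: s.drop i := by
  obtain ⟨hge, hpre, hmin⟩ := PySem.Chars.findFrom_natCast_spec s L k hk h
  have hub : PySem.Chars.findFrom s L (k : Int) none ≤ (s.length : Int) := by
    have heq := PySem.Chars.findFrom_natCast s L k hk
    by_cases hc : PySem.Chars.find (s.drop k) L = -1
    · exact absurd (by rw [heq, if_pos hc]) h
    · have hfl := PySem.Chars.find_le_length (s.drop k) L
      rw [List.length_drop] at hfl
      rw [heq, if_neg hc]
      omega
  refine ⟨(PySem.Chars.findFrom s L (k : Int) none).toNat, by omega, by omega, ⟨by omega, hpre⟩, ?_⟩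
  intro i hki hip
  exact hmin i hki hip

lemma findFrom_of_gt {s L : List Char} {k : Int} (hk : (s.length : Int) < k) :
    PySem.Chars.findFrom s L k none = -1 := by
  unfold PySem.Chars.findFrom
  simp only [if_neg (show ¬ k < 0 by omega)]
  rw [if_pos hk]

lemma rfind_go_spec (s L : List Char) :
    ∀ j : Nat,
      (PySem.Chars.rfind.go s L j = -1 ∧ ∀ i, i ≤ j → ¬ L <+: s.drop i) ∨
      (∃ i : Nat, PySem.Chars.rfind.go s L j = (i : Int) ∧ i ≤ j ∧ L <+: s.drop i ∧
        ∀ i', i < i' → i' ≤ j → ¬ L <+: s.drop i') := by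
  intro j
  induction j with
  | zero =>
    by_cases hp : L <+: s
    · right
      refine ⟨0, ?_, Nat.le_refl 0, by simpa using hp, ?_⟩
      · simp [PySem.Chars.rfind.go, List.isPrefixOf_iff_prefix, hp]
      · intro i' h1 h2; omega
    · left
      constructor
      · simp [PySem.Chars.rfind.go, List.isPrefixOf_iff_prefix, hp]
      · intro i hi
        have hi0 : i = 0 := by omega
        subst hi0; simpa using hp
  | succ j ih =>
    by_cases hp : L <+: s.drop (j + 1)
    · right
      refine ⟨j + 1, ?_, Nat.le_refl _, hp, ?_⟩
      · simp [PySem.Chars.rfind.go, List.isPrefixOf_iff_prefix, hp]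
      · intro i' h1 h2; omega
    · have hgo : PySem.Chars.rfind.go s L (j + 1) = PySem.Chars.rfind.go s L j := by
        simp [PySem.Chars.rfind.go, List.isPrefixOf_iff_prefix, hp]
      rcases ih with ⟨hv, hall⟩ | ⟨i, hv, hij, hpre, hmax⟩
      · left
        refine ⟨by rw [hgo, hv], ?_⟩
        intro i hi
        by_cases hij : i = j + 1
        · subst hij; exact hp
        · exact hall i (by omega)
      · right
        refine ⟨i, by rw [hgo, hv], by omega, hpre, ?_⟩
        intro i' h1 h2
        by_cases h3 : i' = j + 1
        · subst h3; exact hp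
        · exact hmax i' h1 (by omega)

lemma rfind_spec' (t L : List Char) :
    (PySem.Chars.rfind t L = -1 ∧ ∀ i, i ≤ t.length → ¬ L <+: t.drop i) ∨
    (∃ i : Nat, PySem.Chars.rfind t L = (i : Int) ∧ i ≤ t.length ∧ L <+: t.drop i ∧
      ∀ i', i < i' → i' ≤ t.length → ¬ L <+: t.drop i') := by
  unfold PySem.Chars.rfind
  exact rfind_go_spec t L t.length

lemma rfindFrom_zero_some {s L : List Char} {e' : Int} (he : 0 ≤ e') :
    PySem.Chars.rfindFrom s L 0 (some e') =
      PySem.Chars.rfind (s.take (min s.length e'.toNat)) L := by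
  unfold PySem.Chars.rfindFrom
  by_cases hc : (s.length : Int) < e'
  · have h1 : min s.length e'.toNat = s.length := by omega
    simp only [if_pos hc]
    rw [if_neg (by omega : ¬ (0 : Int) < 0), if_neg (by omega : ¬ (s.length : Int) < 0),
      Int.toNat_zero, List.drop_zero, Int.toNat_natCast, h1]
    by_cases hr : PySem.Chars.rfind (s.take s.length) L = -1
    · rw [if_pos hr, hr]
    · rw [if_neg hr, zero_add]
  · have h1 : min s.length e'.toNat = e'.toNat := by omega
    simp only [if_neg hc]
    rw [if_neg (by omega : ¬ e' < 0), if_neg (by omega : ¬ (0 : Int) < 0),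
      if_neg (by omega : ¬ e' < 0), Int.toNat_zero, List.drop_zero, h1]
    by_cases hr : PySem.Chars.rfind (s.take e'.toNat) L = -1
    · rw [if_pos hr, hr]
    · rw [if_neg hr, zero_add]

lemma prefix_take_iff' {L t : List Char} {c : Nat} :
    L <+: t.take c ↔ L <+: t ∧ L.length ≤ c := by
  constructor
  · intro hp
    refine ⟨hp.trans (List.take_prefix c t), ?_⟩
    have h1 := hp.length_le
    simp only [List.length_take] at h1
    omega
  · rintro ⟨hp, hl⟩
    have heq : L = t.take L.length := List.prefix_iff_eq_take.mp hp
    rw [List.prefix_iff_eq_take, List.take_take, min_eq_left hl]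
    exact heq

lemma isOcc_take_iff {s L : List Char} {e j : Nat} :
    IsOcc (s.take e) L j ↔ IsOcc s L j ∧ j + L.length ≤ e := by
  unfold IsOcc
  constructor
  · rintro ⟨hj, hp⟩
    rw [List.drop_take] at hp
    obtain ⟨hp', hl⟩ := prefix_take_iff'.mp hp
    simp only [List.length_take] at hj
    exact ⟨⟨by omega, hp'⟩, by omega⟩
  · rintro ⟨⟨hj, hp⟩, hje⟩
    constructor
    · simp only [List.length_take]; omega
    · rw [List.drop_take]
      exact prefix_take_iff'.mpr ⟨hp, by omega⟩

lemma pyALoop_good (s L : List Char) (h : Int) :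
    ∀ (fuel k : Nat) (b : Int) (db : Option Int),
      k ≤ s.length + 1 → s.length + 2 ≤ fuel + k →
      ((db = none ∧ b = -1 ∧ ∀ j : Nat, j < k → ¬ IsOcc s L j) ∨
       (∃ jb : Nat, b = (jb : Int) ∧ jb < k ∧ IsOcc s L jb ∧ db = some (|b - h|) ∧
         ∀ j : Nat, j < k → IsOcc s L j →
           |b - h| < |(j : Int) - h| ∨ (|b - h| = |(j : Int) - h| ∧ b ≤ (j : Int)))) →
      GoodOut s L h (pyALoop s L h fuel k b db) := by
  intro fuel
  induction fuel with
  | zero =>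
    intro k b db hk hfuel _
    exfalso; omega
  | succ fuel ih =>
    intro k b db hk hfuel hinv
    simp only [pyALoop]
    by_cases hpos : PySem.Chars.findFrom s L (k : Int) none = -1
    · rw [if_pos hpos]
      have hno : ∀ j, k ≤ j → ¬ IsOcc s L j := by
        by_cases hkn : k ≤ s.length
        · exact (findFrom_none_iff hkn).mp hpos
        · intro j hj hocc; exact absurd hocc.1 (by omega)
      rcases hinv with ⟨_, hb, hlt⟩ | ⟨jb, hb, hjbk, hjbocc, _, hjbmin⟩
      · left
        refine ⟨hb, ?_⟩
        intro j
        by_cases hjk : j < k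
        · exact hlt j hjk
        · exact hno j (by omega)
      · right
        refine ⟨jb, hb, hjbocc, ?_⟩
        intro j hocc
        by_cases hjk : j < k
        · exact hjbmin j hjk hocc
        · exact absurd hocc (hno j (by omega))
    · rw [if_neg hpos]
      have hkn : k ≤ s.length := by
        by_contra hgt
        exact hpos (findFrom_of_gt (by omega))
      obtain ⟨p, hfp, hkp, hpocc, hpmin⟩ := findFrom_pos_spec' hkn hpos
      rw [hfp]
      simp only [Int.toNat_natCast]
      rcases hinv with ⟨hdbn, _, hlt⟩ | ⟨jb, hb, hjbk, hjbocc, hdb, hjbmin⟩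
      · subst hdbn
        show GoodOut s L h (pyALoop s L h fuel (p + 1) (p : Int) (some |(p : Int) - h|))
        apply ih (p + 1) (p : Int) (some |(p : Int) - h|)
        · have := hpocc.1; omega
        · omega
        · right
          refine ⟨p, rfl, by omega, hpocc, rfl, ?_⟩
          intro j hjp1 hjocc
          by_cases hjk : j < k
          · exact absurd hjocc (hlt j hjk)
          · by_cases hjp : j = p
            · subst hjp; right; exact ⟨rfl, le_refl _⟩
            · exact absurd hjocc.2 (hpmin j (by omega) (by omega))
      · subst hdb
        show GoodOut s L h
          (if |(p : Int) - h| < |b - h| then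
            pyALoop s L h fuel (p + 1) (p : Int) (some |(p : Int) - h|)
          else pyALoop s L h fuel (p + 1) b (some |b - h|))
        by_cases himp : |(p : Int) - h| < |b - h|
        · rw [if_pos himp]
          apply ih (p + 1) (p : Int) (some |(p : Int) - h|)
          · have := hpocc.1; omega
          · omega
          · right
            refine ⟨p, rfl, by omega, hpocc, rfl, ?_⟩
            intro j hjp1 hjocc
            by_cases hjk : j < k
            · left
              rcases hjbmin j hjk hjocc with h1 | ⟨h2, _⟩
              · exact himp.trans h1
              · rw [← h2]; exact himp
            · by_cases hjp : j = p
              · subst hjp; right; exact ⟨rfl, le_refl _⟩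
              · exact absurd hjocc.2 (hpmin j (by omega) (by omega))
        · rw [if_neg himp]
          apply ih (p + 1) b (some |b - h|)
          · have := hpocc.1; omega
          · omega
          · right
            refine ⟨jb, hb, by omega, hjbocc, rfl, ?_⟩
            intro j hjp1 hjocc
            by_cases hjk : j < k
            · exact hjbmin j hjk hjocc
            · by_cases hjp : j = p
              · subst hjp
                have hle : |b - h| ≤ |(j : Int) - h| := not_lt.mp himp
                rcases lt_or_eq_of_le hle with h1 | h2
                · exact Or.inl h1
                · refine Or.inr ⟨h2, ?_⟩
                  rw [hb]
                  have : jb < j := by omega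
                  exact_mod_cast this.le
              · exact absurd hjocc.2 (hpmin j (by omega) (by omega))

lemma A_good (text target : String) (h : Int) :
    GoodOut text.toList target.toList h (find_closest_occurrence_py text target h) := by
  unfold find_closest_occurrence_py
  apply pyALoop_good text.toList target.toList h (text.toList.length + 2) 0 (-1) none
  · omega
  · omega
  · left
    exact ⟨rfl, rfl, fun j hj => absurd hj (Nat.not_lt_zero j)⟩

lemma B_good (text target : String) (h : Int) :
    GoodOut text.toList target.toList h (find_closest_occurrence_py_alt text target h) := by
  unfold find_closest_occurrence_py_alt
  by_cases hh : h ≤ 0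
  · rw [if_pos hh]
    unfold pyAfter
    rw [PySem.Str.findFrom_eq, max_eq_right hh, PySem.Chars.findFrom_zero]
    set s := text.toList with hs
    set L := target.toList with hL
    by_cases hf : PySem.Chars.find s L = -1
    · left
      refine ⟨hf, ?_⟩
      intro j hocc
      have hinf : L <:+: s.drop 0 := isOcc_infix_drop (Nat.zero_le j) hocc
      rw [List.drop_zero] at hinf
      exact (PySem.Chars.find_eq_neg_one_iff s L).mp hf hinf
    · have hinf : L <:+: s := by
        by_contra hni
        exact hf ((PySem.Chars.find_eq_neg_one_iff s L).mpr hni)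
      have h0 : 0 ≤ PySem.Chars.find s L := (PySem.Chars.find_nonneg_iff s L).mpr hinf
      obtain ⟨hpre, hmin⟩ := PySem.Chars.find_spec h0
      have hle : PySem.Chars.find s L ≤ (s.length : Int) := PySem.Chars.find_le_length s L
      right
      refine ⟨(PySem.Chars.find s L).toNat, by omega, ⟨by omega, hpre⟩, ?_⟩
      intro j hocc
      have hjr : (PySem.Chars.find s L).toNat ≤ j := by
        by_contra hlt
        exact hmin j (by omega) hocc.2
      have e1 : |PySem.Chars.find s L - h| = PySem.Chars.find s L - h :=
        abs_of_nonneg (by omega)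
      have e2 : |(j : Int) - h| = (j : Int) - h := abs_of_nonneg (by omega)
      rw [e1, e2]
      omega
  · rw [not_le] at hh
    rw [if_neg (by omega : ¬ h ≤ 0)]
    set s := text.toList with hs
    set L := target.toList with hL
    have hmax : max h 0 = h := max_eq_left (by omega)
    have hAfter :
        (pyAfter text target h = -1 ∧ ∀ j : Nat, h ≤ (j : Int) → ¬ IsOcc s L j) ∨
        (∃ a : Nat, pyAfter text target h = (a : Int) ∧ h ≤ (a : Int) ∧ IsOcc s L a ∧
          ∀ j : Nat, h ≤ (j : Int) → IsOcc s L j → a ≤ j) := by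
      unfold pyAfter
      rw [PySem.Str.findFrom_eq, hmax, ← hs, ← hL]
      by_cases hn' : h ≤ (s.length : Int)
      · have hcast : ((h.toNat : Nat) : Int) = h := by omega
        have hkn : h.toNat ≤ s.length := by omega
        rw [← hcast]
        by_cases hfa : PySem.Chars.findFrom s L ((h.toNat : Nat) : Int) none = -1
        · left
          refine ⟨hfa, ?_⟩
          intro j hj
          exact (findFrom_none_iff hkn).mp hfa j (by omega)
        · obtain ⟨p, hfp, hkp, hpocc, hpmin⟩ := findFrom_pos_spec' hkn hfa
          right
          refine ⟨p, hfp, by omega, hpocc, ?_⟩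
          intro j hj hjocc
          by_contra hlt
          exact hpmin j (by omega) (by omega) hjocc.2
      · left
        refine ⟨findFrom_of_gt (by omega), ?_⟩
        intro j hj hocc
        have := hocc.1
        omega
    have hBefore :
        (pyBefore text target h = -1 ∧ ∀ j : Nat, (j : Int) < h → ¬ IsOcc s L j) ∨
        (∃ bf : Nat, pyBefore text target h = (bf : Int) ∧ (bf : Int) < h ∧ IsOcc s L bf ∧
          ∀ j : Nat, (j : Int) < h → IsOcc s L j → j ≤ bf) := by
      unfold pyBefore
      rw [PySem.Str.rfindFrom_eq, PySem.Str.len_eq, ← hs, ← hL]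
      have he' : 0 ≤ h + (L.length : Int) - 1 := by omega
      rw [rfindFrom_zero_some he']
      set e : Nat := min s.length (h + (L.length : Int) - 1).toNat with he
      have heval : ∀ j : Nat,
          (IsOcc s L j ∧ (j : Int) < h) ↔ (j ≤ (s.take e).length ∧ L <+: (s.take e).drop j) := by
        intro j
        have h1 := @isOcc_take_iff s L e j
        constructor
        · rintro ⟨hocc, hjh⟩
          have hm : L.length ≤ s.length - j := by
            have h2 := hocc.2.length_le
            rw [List.length_drop] at h2
            omega
          have h3 : j + L.length ≤ e := by
            have := hocc.1
            omega
          exact h1.mpr ⟨hocc, h3⟩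
        · intro hocc'
          have h2 := h1.mp hocc'
          refine ⟨h2.1, ?_⟩
          have h3 := h2.2
          omega
      rcases rfind_spec' (s.take e) L with ⟨hv, hnone⟩ | ⟨i, hv, hile, hipre, himax⟩
      · left
        refine ⟨hv, ?_⟩
        intro j hj hocc
        have h4 := (heval j).mp ⟨hocc, hj⟩
        exact hnone j h4.1 h4.2
      · right
        have h5 := (heval i).mpr ⟨hile, hipre⟩
        refine ⟨i, hv, h5.2, h5.1, ?_⟩
        intro j hj hocc
        by_contra hgt
        rw [not_le] at hgt
        have hj' := (heval j).mp ⟨hocc, hj⟩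
        exact himax j hgt hj'.1 hj'.2
    rcases hBefore with ⟨hbv, hbnone⟩ | ⟨bf, hbv, hbfh, hbfocc, hbfmax⟩
    · rw [if_pos hbv]
      rcases hAfter with ⟨hav, hanone⟩ | ⟨a, hav, hah, haocc, hamin⟩
      · rw [hav]
        left
        refine ⟨rfl, ?_⟩
        intro j hocc
        rcases lt_or_ge ((j : Int)) h with hj | hj
        · exact hbnone j hj hocc
        · exact hanone j hj hocc
      · rw [hav]
        right
        refine ⟨a, rfl, haocc, ?_⟩
        intro j hocc
        rcases lt_or_ge ((j : Int)) h with hj | hj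
        · exact absurd hocc (hbnone j hj)
        · have haj : a ≤ j := hamin j hj hocc
          have e1 : |(a : Int) - h| = (a : Int) - h := abs_of_nonneg (by omega)
          have e2 : |(j : Int) - h| = (j : Int) - h := abs_of_nonneg (by omega)
          rw [e1, e2]
          omega
    · have hbne : pyBefore text target h ≠ -1 := by rw [hbv]; omega
      rw [if_neg hbne]
      rcases hAfter with ⟨hav, hanone⟩ | ⟨a, hav, hah, haocc, hamin⟩
      · rw [if_pos hav, hbv]
        right
        refine ⟨bf, rfl, hbfocc, ?_⟩
        intro j hocc
        rcases lt_or_ge ((j : Int)) h with hj | hj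
        · have hjb : j ≤ bf := hbfmax j hj hocc
          have e1 : |(bf : Int) - h| = h - (bf : Int) := by
            rw [abs_of_nonpos (by omega)]; ring
          have e2 : |(j : Int) - h| = h - (j : Int) := by
            rw [abs_of_nonpos (by omega)]; ring
          rw [e1, e2]
          omega
        · exact absurd hocc (hanone j hj)
      · have hane : pyAfter text target h ≠ -1 := by rw [hav]; omega
        rw [if_neg hane, hbv, hav]
        by_cases hcmp : h - (bf : Int) ≤ (a : Int) - h
        · rw [if_pos hcmp]
          right
          refine ⟨bf, rfl, hbfocc, ?_⟩
          intro j hocc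
          have e1 : |(bf : Int) - h| = h - (bf : Int) := by
            rw [abs_of_nonpos (by omega)]; ring
          rcases lt_or_ge ((j : Int)) h with hj | hj
          · have hjb : j ≤ bf := hbfmax j hj hocc
            have e2 : |(j : Int) - h| = h - (j : Int) := by
              rw [abs_of_nonpos (by omega)]; ring
            rw [e1, e2]
            omega
          · have haj : a ≤ j := hamin j hj hocc
            have e2 : |(j : Int) - h| = (j : Int) - h := abs_of_nonneg (by omega)
            rw [e1, e2]
            omega
        · rw [if_neg hcmp]
          right
          refine ⟨a, rfl, haocc, ?_⟩
          intro j hocc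
          have e1 : |(a : Int) - h| = (a : Int) - h := abs_of_nonneg (by omega)
          rcases lt_or_ge ((j : Int)) h with hj | hj
          · have hjb : j ≤ bf := hbfmax j hj hocc
            have e2 : |(j : Int) - h| = h - (j : Int) := by
              rw [abs_of_nonpos (by omega)]; ring
            rw [e1, e2]
            omega
          · have haj : a ≤ j := hamin j hj hocc
            have e2 : |(j : Int) - h| = (j : Int) - h := abs_of_nonneg (by omega)
            rw [e1, e2]
            omega

-- ===== VERDICT (by name: the statement is the Claim_ definition above) =====
theorem find_closest_occurrence_py_spec : Claim_equal_find_closest_occurrence_py := by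
  intro text target hint_offset _
  show find_closest_occurrence_py text target hint_offset =
    find_closest_occurrence_py_alt text target hint_offset
  exact goodOut_unique (A_good text target hint_offset) (B_good text target hint_offset)
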